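-- pv_equiv track=rewrite | github.com/djsbalakrishnan/InterviewQuestions | Queues/TaskScheduling/solution.py | solve
-- ===== SOURCE A (Python) =====
-- from collections import deque
--
-- def solve(A, B):
--     scheduler_q = deque(A)
--     clockcycle = 0
--
--     for ele in B:
--         t = scheduler_q.popleft()
--         while t != ele:
--             scheduler_q.append(t)
--             t = scheduler_q.popleft()
--             clockcycle += 1
--         clockcycle += 1
--
--     return clockcycle
-- ===== SOURCE B (Python) =====
-- def solve(A, B):
--     q = list(A)
--     clock = 0
--     for ele in B:
--         i = q.index(ele)
--         clock += i + 1
--         q = q[i + 1:] + q[:i]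
--     return clock
-- ===== Notes on version B (the rewrite author's own statement) =====
-- stated objective: simpler
-- what changed: Instead of popping and re-appending queue elements one at a time in an inner while loop, B locates each target with a single list.index call and rebuilds the queue with two slices, removing the element-by-element rotation entirely.
import Mathlib
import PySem

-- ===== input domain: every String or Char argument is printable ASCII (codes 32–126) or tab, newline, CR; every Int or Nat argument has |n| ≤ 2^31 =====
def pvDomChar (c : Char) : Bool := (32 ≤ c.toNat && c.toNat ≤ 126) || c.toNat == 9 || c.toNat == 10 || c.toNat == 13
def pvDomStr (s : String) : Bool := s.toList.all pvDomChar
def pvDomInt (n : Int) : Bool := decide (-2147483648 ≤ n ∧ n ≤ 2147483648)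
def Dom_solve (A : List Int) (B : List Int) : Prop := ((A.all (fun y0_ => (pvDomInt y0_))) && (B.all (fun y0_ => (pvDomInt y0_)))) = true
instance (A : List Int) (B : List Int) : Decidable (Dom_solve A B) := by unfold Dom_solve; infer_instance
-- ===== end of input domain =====

-- B replaces A's element-by-element rotation (inner while loop of pops/appends) by one
-- list.index call and two slices per B element; return value only, A mutates no argument.

-- ===== PORT A =====
-- inner `while t != ele` loop; fuel (the current queue length) is only a totality
-- guard — under Pre_solve the match is found before fuel runs out (none = A diverges/raises)
def rotA (ele : Int) : Nat → List Int → Option (List Int × Int)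
  | _, [] => none            -- popleft from empty deque: IndexError
  | fuel, t :: rest =>
    if t = ele then some (rest, 1)
    else
      match fuel with
      | 0 => none
      | f + 1 => (rotA ele f (rest ++ [t])).map (fun p => (p.1, p.2 + 1))

def solveGo : List Int → Int → List Int → Int
  | _, cc, [] => cc
  | q, cc, ele :: bs =>
    match rotA ele q.length q with
    | none => cc
    | some (q', c) => solveGo q' (cc + c) bs

def solve (A : List Int) (B : List Int) : Int := solveGo A 0 B

-- ===== PORT B =====
def altGo : List Int → Int → List Int → Int
  | _, cc, [] => cc
  | q, cc, ele :: bs =>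
    match PySem.List.index? q ele with
    | none => cc             -- q.index(ele): ValueError
    | some i =>
        altGo (PySem.List.slice q (some ((i : Int) + 1)) none ++
               PySem.List.slice q none (some (i : Int)))
              (cc + ((i : Int) + 1)) bs

def solve_alt (A : List Int) (B : List Int) : Int := altGo A 0 B

-- ===== PRECONDITION & SPEC =====
-- Pre_solve excludes exactly the inputs on which A does not return: some B element is
-- missing from the remaining queue (A loops forever, or raises IndexError on an empty queue).
def Pre_solve (A : List Int) (B : List Int) : Prop :=
  ∀ x ∈ B, B.count x ≤ A.count x
instance (A : List Int) (B : List Int) : Decidable (Pre_solve A B) := by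
  unfold Pre_solve; infer_instance

def pvWitness_solve : List Int × List Int := ([3, 1, 2, 1], [2, 1, 1, 3])

def Spec_solve (A : List Int) (B : List Int) (out : Int) : Prop := out = solve_alt A B
instance (A : List Int) (B : List Int) (out : Int) : Decidable (Spec_solve A B out) := by
  unfold Spec_solve; infer_instance

-- ===== CLAIM (what is proved, stated in full; the proofs are below) =====
def Claim_equal_solve : Prop :=
  ∀ (A : List Int) (B : List Int), Dom_solve A B → Pre_solve A B → Spec_solve A B (solve A B)

-- ===== LEMMAS AND PROOFS =====

lemma drop_len_succ (pre suf : List Int) (ele : Int) :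
    (pre ++ ele :: suf).drop (pre.length + 1) = suf := by
  induction pre with
  | nil => rfl
  | cons a t ih =>
    simp only [List.length_cons, List.cons_append, List.drop_succ_cons]
    exact ih

-- A's rotation loop finds the FIRST occurrence of ele: i+1 pops, queue becomes drop (i+1) ++ take i
lemma rotA_eq (ele : Int) :
    ∀ (i fuel : Nat) (q : List Int), PySem.List.index? q ele = some i → i ≤ fuel →
      rotA ele fuel q = some (q.drop (i + 1) ++ q.take i, (i : Int) + 1) := by
  intro i
  induction i with
  | zero =>
    intro fuel q hidx _
    rcases (PySem.List.index?_eq_some_iff _ _ _).1 hidx with ⟨pre, suf, hq, hlen, -⟩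
    have hpre : pre = [] := List.eq_nil_of_length_eq_zero hlen
    subst hpre; simp at hq; subst hq
    cases fuel <;> simp [rotA]
  | succ i ih =>
    intro fuel q hidx hle
    rcases (PySem.List.index?_eq_some_iff _ _ _).1 hidx with ⟨pre, suf, hq, hlen, hnm⟩
    cases pre with
    | nil => simp at hlen
    | cons x pre' =>
      subst hq
      have hxne : x ≠ ele := by intro h; exact hnm (h ▸ List.mem_cons_self ..)
      have hlen' : pre'.length = i := by simpa using hlen
      cases fuel with
      | zero => omega
      | succ f =>
        have hnm' : ele ∉ pre' := fun h => hnm (List.mem_cons_of_mem _ h)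
        have hidx' : PySem.List.index? ((pre' ++ ele :: suf) ++ [x]) ele = some i := by
          refine (PySem.List.index?_eq_some_iff _ _ _).2 ⟨pre', suf ++ [x], ?_, hlen', hnm'⟩
          simp
        have := ih f ((pre' ++ ele :: suf) ++ [x]) hidx' (by omega)
        have hdtake : ((pre' ++ ele :: suf) ++ [x]).take i = pre' := by
          rw [← hlen', List.append_assoc, List.take_left]
        have hddrop : ((pre' ++ ele :: suf) ++ [x]).drop (i + 1) = suf ++ [x] := by
          rw [← hlen', List.append_assoc]
          simp only [List.cons_append]
          exact drop_len_succ pre' (suf ++ [x]) ele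
        simp only [List.cons_append]
        simp only [rotA, if_neg hxne]
        rw [show pre' ++ ele :: suf ++ [x] = (pre' ++ ele :: suf) ++ [x] by simp] at this ⊢
        rw [this, hdtake, hddrop]
        have h1 : (x :: (pre' ++ ele :: suf)).drop (i + 1 + 1) = suf := by
          simp only [List.drop_succ_cons, ← hlen']
          exact drop_len_succ pre' suf ele
        have h2 : (x :: (pre' ++ ele :: suf)).take (i + 1) = x :: pre' := by
          simp only [List.take_succ_cons, ← hlen', List.take_left]
        simp only [Option.map_some]
        rw [h1, h2]
        have hc : ((i : Int) + 1 + 1) = (((i + 1 : Nat)) : Int) + 1 := by push_cast; ring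
        rw [List.append_assoc, List.singleton_append, hc]

-- the queue decomposes at the first occurrence of ele
lemma index?_decomp {q : List Int} {ele : Int} {i : Nat}
    (h : PySem.List.index? q ele = some i) :
    q.take i ++ ele :: q.drop (i + 1) = q ∧ i < q.length := by
  rcases (PySem.List.index?_eq_some_iff _ _ _).1 h with ⟨pre, suf, hq, hlen, -⟩
  subst hq
  constructor
  · rw [← hlen, List.take_left, drop_len_succ]
  · simp; omega

lemma go_eq :
    ∀ (bs q : List Int) (cc : Int),
      (∀ x ∈ bs, bs.count x ≤ q.count x) →
      solveGo q cc bs = altGo q cc bs := by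
  intro bs
  induction bs with
  | nil => intro q cc _; rfl
  | cons ele bs ih =>
    intro q cc hcnt
    have h0 : 1 ≤ q.count ele := by
      have := hcnt ele (List.mem_cons_self ..)
      simp [List.count_cons_self] at this
      omega
    have hmem : ele ∈ q := List.count_pos_iff.1 (by omega)
    obtain ⟨i, hidx⟩ := Option.isSome_iff_exists.1 ((PySem.List.index?_isSome_iff ..).2 hmem)
    obtain ⟨hdec, hilt⟩ := index?_decomp hidx
    have hrot := rotA_eq ele i q.length q hidx (by omega)
    have hslice1 : PySem.List.slice q (some ((i : Int) + 1)) none = q.drop (i + 1) := by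
      rw [show ((i : Int) + 1) = (((i + 1 : Nat)) : Int) by push_cast; ring,
          PySem.List.slice_from_natCast]
    have hslice2 : PySem.List.slice q none (some (i : Int)) = q.take i := by
      rw [PySem.List.slice_to_natCast]
    simp only [solveGo, altGo, hrot, hidx, hslice1, hslice2]
    apply ih
    intro x hx
    have hstep := hcnt x (List.mem_cons_of_mem _ hx)
    -- rewrite q's count through the decomposition at index i
    have hqcount : q.count x = (q.drop (i + 1) ++ q.take i).count x
        + (if ele = x then 1 else 0) := by
      conv_lhs => rw [← hdec]
      by_cases hev : ele = x
      · simp [List.count_append, hev]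
        omega
      · simp [List.count_append, hev]
        omega
    have hccount : (ele :: bs).count x
        = bs.count x + (if ele = x then 1 else 0) := by
      by_cases hev : ele = x
      · simp [hev]
      · simp [hev]
    rw [hccount, hqcount] at hstep
    split_ifs at hstep <;> omega

-- ===== VERDICT (by name: the statement is the Claim_ definition above) =====
theorem solve_spec : Claim_equal_solve := by
  intro A B _ hPre
  unfold Spec_solve solve solve_alt
  exact go_eq B A 0 hPre
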